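-- pv_equiv track=rewrite | github.com/yitianlian/slime | tools/trace_timeline_viewer.py | _compute_span_depths
-- ===== SOURCE A (Python) =====
-- from typing import Any
--
-- def _compute_span_depths(spans: list[dict[str, Any]]) -> dict[str, int]:
--     span_by_id = {span["span_id"]: span for span in spans if span.get("span_id")}
--     cache: dict[str, int] = {}
--
--     def resolve(span_id: str | None, seen: set[str]) -> int:
--         if not span_id or span_id not in span_by_id:
--             return 0
--         if span_id in cache:
--             return cache[span_id]
--         if span_id in seen:
--             cache[span_id] = 0
--             return 0
--         seen.add(span_id)
--         parent_id = span_by_id[span_id].get("parent_span_id")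
--         depth = 0 if not parent_id or parent_id not in span_by_id else resolve(parent_id, seen) + 1
--         cache[span_id] = depth
--         return depth
--
--     for span in spans:
--         span_id = span.get("span_id")
--         if span_id:
--             resolve(span_id, set())
--     return cache
-- ===== SOURCE B (Python) =====
-- def _compute_span_depths(spans):
--     span_by_id = {span["span_id"]: span for span in spans if span.get("span_id")}
--     cache = {}
--     for span in spans:
--         start = span.get("span_id")
--         if not start:
--             continue
--         # iterative resolution: collect the parent chain, then assign depths outward
--         path = []
--         cur = start
--         while True:
--             if not cur or cur not in span_by_id:
--                 base = 0
--                 break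
--             if cur in cache:
--                 base = cache[cur] + 1
--                 break
--             if cur in path:
--                 cache[cur] = 0  # cycle closes at depth 0, re-assigned below
--                 base = 1
--                 break
--             path.append(cur)
--             cur = span_by_id[cur].get("parent_span_id")
--         for i, node in enumerate(reversed(path)):
--             cache[node] = base + i
--     return cache
-- ===== Notes on version B (the rewrite author's own statement) =====
-- stated objective: alternative
-- what changed: A resolves each span's depth by a recursive memoised parent-chain walk with a per-call seen set; B is iterative: it collects the uncached parent chain into an explicit path list in one loop, then assigns depths outward from the stopping point (missing parent, cached ancestor, or cycle) in a second loop.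
import Mathlib
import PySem

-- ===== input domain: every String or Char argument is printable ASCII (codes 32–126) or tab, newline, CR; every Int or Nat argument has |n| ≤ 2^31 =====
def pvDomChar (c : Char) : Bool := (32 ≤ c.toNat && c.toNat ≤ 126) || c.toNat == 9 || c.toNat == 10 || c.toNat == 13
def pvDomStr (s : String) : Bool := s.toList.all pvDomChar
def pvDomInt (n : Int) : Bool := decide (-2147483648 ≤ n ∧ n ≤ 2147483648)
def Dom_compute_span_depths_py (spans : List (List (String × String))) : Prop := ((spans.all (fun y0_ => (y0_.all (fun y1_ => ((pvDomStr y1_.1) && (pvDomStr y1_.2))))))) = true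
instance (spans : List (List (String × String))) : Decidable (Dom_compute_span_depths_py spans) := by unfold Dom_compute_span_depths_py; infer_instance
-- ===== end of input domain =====

-- B replaces A's per-start recursive memoised resolver by an iterative two-phase walk
-- (collect the parent chain, then assign depths outward); objective: alternative decomposition, same cost.

-- shared helpers (the same Python lines occur verbatim in both A and Source B)
-- span.get(k): first-match lookup in the span's association list
def pvGet (span : List (String × String)) (k : String) : Option String :=
  (PySem.Dict.mk span).get? k

-- span_by_id = {span["span_id"]: span for span in spans if span.get("span_id")}
def pvSpanById (spans : List (List (String × String))) : PySem.Dict String (List (String × String)) :=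
  spans.foldl (fun d span =>
    match pvGet span "span_id" with
    | none => d
    | some id => if id = "" then d else d.insert id span) PySem.Dict.empty

-- ===== PORT A =====
-- "not parent_id or parent_id not in span_by_id" (negated)
def pvParentOk (sbi : PySem.Dict String (List (String × String))) : Option String → Bool
  | none => false
  | some p => (p != "") && sbi.contains p

-- resolve(span_id, seen): fuel = recursion-depth guard only (spans.length + 1 always suffices:
-- each recursive call adds a distinct span_by_id key to seen)
def pvResolve (sbi : PySem.Dict String (List (String × String))) :
    Nat → Option String → List String → PySem.Dict String Int → Int × PySem.Dict String Int
  | 0, _, _, cache => (0, cache)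
  | _ + 1, none, _, cache => (0, cache)
  | fuel + 1, some id, seen, cache =>
    if id = "" then (0, cache)
    else
      match sbi.get? id with
      | none => (0, cache)
      | some sp =>
        match cache.get? id with
        | some v => (v, cache)
        | none =>
          if id ∈ seen then (0, cache.insert id 0)
          else
            let seen' := PySem.Set.add seen id
            let parent := pvGet sp "parent_span_id"
            let pd : Int × PySem.Dict String Int :=
              if pvParentOk sbi parent then
                let r := pvResolve sbi fuel parent seen' cache
                (r.1 + 1, r.2)
              else (0, cache)
            (pd.1, pd.2.insert id pd.1)

def compute_span_depths_py (spans : List (List (String × String))) : List (String × Int) :=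
  let sbi := pvSpanById spans
  (spans.foldl (fun cache span =>
    match pvGet span "span_id" with
    | none => cache
    | some id =>
      if id = "" then cache
      else (pvResolve sbi (spans.length + 1) (some id) [] cache).2) PySem.Dict.empty).items

-- ===== PORT B =====
-- how Source B's chain-collecting while-loop stopped
inductive PvStop where
  | invalid
  | cachedv (v : Int)
  | cyc (m : String)
deriving Repr, DecidableEq

-- the while-loop of Source B: collect the uncached parent chain from cur; fuel = totality guard only
def pvWalk (sbi : PySem.Dict String (List (String × String))) (cache : PySem.Dict String Int) :
    Nat → Option String → List String → List String × PvStop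
  | 0, _, _ => ([], PvStop.invalid)
  | _ + 1, none, _ => ([], PvStop.invalid)
  | fuel + 1, some id, path =>
    if id = "" then ([], PvStop.invalid)
    else
      match sbi.get? id with
      | none => ([], PvStop.invalid)
      | some sp =>
        match cache.get? id with
        | some v => ([], PvStop.cachedv v)
        | none =>
          if id ∈ path then ([], PvStop.cyc id)
          else
            let r := pvWalk sbi cache fuel (pvGet sp "parent_span_id") (path ++ [id])
            (id :: r.1, r.2)

-- the break arms of Source B's loop: cycle pre-insert and the base depth for the deepest node
def pvStopBase (cache : PySem.Dict String Int) : PvStop → Int × PySem.Dict String Int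
  | PvStop.invalid => (0, cache)
  | PvStop.cachedv v => (v + 1, cache)
  | PvStop.cyc m => (1, cache.insert m 0)

-- assignment phase: for i, node in enumerate(reversed(path)): cache[node] = base + i
-- (.1 is the depth the chain head received; it is what A's resolve returns)
def pvFinish (cache : PySem.Dict String Int) : List String × PvStop → Int × PySem.Dict String Int
  | (path, stop) =>
    let s0 := pvStopBase cache stop
    let res := path.reverse.foldl (fun st node => (st.1 + 1, st.2.insert node st.1)) s0
    (match path, stop with
     | [], PvStop.cachedv v => v
     | [], _ => 0
     | _ :: _, _ => res.1 - 1, res.2)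

def compute_span_depths_py_alt (spans : List (List (String × String))) : List (String × Int) :=
  let sbi := pvSpanById spans
  (spans.foldl (fun cache span =>
    match pvGet span "span_id" with
    | none => cache
    | some id =>
      if id = "" then cache
      else (pvFinish cache (pvWalk sbi cache (spans.length + 1) (some id) [])).2) PySem.Dict.empty).items

-- ===== PRECONDITION & SPEC =====
def Spec_compute_span_depths_py (spans : List (List (String × String))) (out : List (String × Int)) : Prop := out = compute_span_depths_py_alt spans
instance (spans : List (List (String × String))) (out : List (String × Int)) : Decidable (Spec_compute_span_depths_py spans out) := by unfold Spec_compute_span_depths_py; infer_instance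

-- ===== CLAIM (what is proved, stated in full; the proofs are below) =====
def Claim_equal_compute_span_depths_py : Prop := ∀ (spans : List (List (String × String))), Dom_compute_span_depths_py spans → Spec_compute_span_depths_py spans (compute_span_depths_py spans)

-- ===== LEMMAS AND PROOFS =====

lemma pvGet_mem_keys {d : PySem.Dict String (List (String × String))} {k : String}
    {v : List (String × String)} (h : d.get? k = some v) : k ∈ d.keys := by
  by_contra hk
  rw [← PySem.Dict.get?_eq_none_iff_not_mem_keys] at hk
  simp [h] at hk

lemma pvFinish_cons (cache : PySem.Dict String Int) (id : String) (rest : List String)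
    (stop : PvStop) (h : rest = [] → stop ≠ PvStop.invalid) :
    pvFinish cache (id :: rest, stop) =
      ((pvFinish cache (rest, stop)).1 + 1,
       (pvFinish cache (rest, stop)).2.insert id ((pvFinish cache (rest, stop)).1 + 1)) := by
  cases rest with
  | nil =>
    cases stop with
    | invalid => exact (h rfl rfl).elim
    | cachedv v => simp [pvFinish, pvStopBase]
    | cyc m => simp [pvFinish, pvStopBase]
  | cons x xs =>
    simp only [pvFinish, List.reverse_cons, List.foldl_append, List.foldl_cons, List.foldl_nil]
    cases stop <;> simp [pvStopBase]

lemma pvMain (sbi : PySem.Dict String (List (String × String))) :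
    ∀ (fuel : Nat) (cur : Option String) (path : List String) (cache : PySem.Dict String Int),
      sbi.keys.length < path.length + fuel →
      (∀ x ∈ path, x ∈ sbi.keys) → path.Nodup →
      pvResolve sbi fuel cur path cache = pvFinish cache (pvWalk sbi cache fuel cur path) := by
  intro fuel
  induction fuel with
  | zero =>
    intro cur path cache hf hsub hnd
    exact absurd ((List.subperm_of_subset hnd hsub).length_le) (by omega)
  | succ fuel ih =>
    intro cur path cache hf hsub hnd
    cases cur with
    | none => simp [pvResolve, pvWalk, pvFinish, pvStopBase]
    | some id =>
      by_cases hid : id = ""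
      · simp [pvResolve, pvWalk, pvFinish, pvStopBase, hid]
      cases hget : sbi.get? id with
      | none => simp [pvResolve, pvWalk, pvFinish, pvStopBase, hid, hget]
      | some sp =>
        cases hc : cache.get? id with
        | some v => simp [pvResolve, pvWalk, pvFinish, pvStopBase, hid, hget, hc]
        | none =>
          by_cases hmem : id ∈ path
          · simp [pvResolve, pvWalk, pvFinish, pvStopBase, hid, hget, hc, hmem]
          · have hkey : id ∈ sbi.keys := pvGet_mem_keys hget
            have hsub' : ∀ x ∈ path ++ [id], x ∈ sbi.keys := by
              intro x hx; rcases List.mem_append.mp hx with h | h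
              · exact hsub x h
              · simp at h; subst h; exact hkey
            have hnd' : (path ++ [id]).Nodup := by
              simpa [List.nodup_append] using ⟨hnd, fun a ha h => hmem (h ▸ ha)⟩
            have hlen : path.length + 1 ≤ sbi.keys.length :=
              (List.subperm_of_subset hnd' hsub').length_le |>.trans_eq' (by simp)
            have hfpos : 1 ≤ fuel := by omega
            have hadd : PySem.Set.add path id = path ++ [id] := by
              simp [PySem.Set.add, hmem]
            by_cases hok : pvParentOk sbi (pvGet sp "parent_span_id") = true
            · -- parent valid: both sides recurse
              have ihr := ih (pvGet sp "parent_span_id") (path ++ [id]) cache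
                (by simp; omega) hsub' hnd'
              have hside : (pvWalk sbi cache fuel (pvGet sp "parent_span_id") (path ++ [id])).1 = [] →
                  (pvWalk sbi cache fuel (pvGet sp "parent_span_id") (path ++ [id])).2 ≠ PvStop.invalid := by
                obtain ⟨f', rfl⟩ : ∃ f', fuel = f' + 1 := ⟨fuel - 1, by omega⟩
                cases hpar : pvGet sp "parent_span_id" with
                | none => simp [pvParentOk, hpar] at hok
                | some p =>
                  have hp : p ≠ "" := by
                    intro h; subst h; simp [pvParentOk, hpar] at hok
                  have hcon : sbi.contains p = true := by
                    simp [pvParentOk, hpar, hp] at hok; exact hok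
                  rw [PySem.Dict.contains_eq_isSome_get?] at hcon
                  obtain ⟨sp', hsp'⟩ := Option.isSome_iff_exists.mp hcon
                  cases hc' : cache.get? p with
                  | some v => simp [pvWalk, hp, hsp', hc']
                  | none =>
                    by_cases hm' : p ∈ path ++ [id] <;>
                      simp [pvWalk, hp, hsp', hc', hm']
              simp only [pvResolve, pvWalk, hid, if_false, hget, hc, hmem, hok,
                if_true, hadd]
              rw [ihr, pvFinish_cons cache id _ _ (fun h1 h2 => hside h1 h2)]
            · -- parent invalid: A stops; B's walk stops at the next node
              have hwalk : pvWalk sbi cache fuel (pvGet sp "parent_span_id") (path ++ [id]) =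
                  ([], PvStop.invalid) := by
                obtain ⟨f', rfl⟩ : ∃ f', fuel = f' + 1 := ⟨fuel - 1, by omega⟩
                cases hpar : pvGet sp "parent_span_id" with
                | none => simp [pvWalk]
                | some p =>
                  by_cases hp : p = ""
                  · simp [pvWalk, hp]
                  · have : sbi.contains p = false := by
                      cases hcp : sbi.contains p
                      · rfl
                      · exact absurd (by simp [pvParentOk, hpar, hp, hcp]) hok
                    have hn : sbi.get? p = none := by
                      rw [PySem.Dict.contains_eq_isSome_get?] at this
                      exact Option.not_isSome_iff_eq_none.mp (by simp [this])
                    simp [pvWalk, hp, hn]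
              simp only [pvResolve, pvWalk, hid, if_false, hget, hc, hmem, hok,
                if_false, hadd]
              rw [hwalk]
              simp [pvFinish, pvStopBase]

lemma pvSpanById_keys_le (spans : List (List (String × String))) :
    (pvSpanById spans).keys.length ≤ spans.length := by
  suffices h : ∀ (l : List (List (String × String))) (d : PySem.Dict String (List (String × String))),
      ((l.foldl (fun d span =>
        match pvGet span "span_id" with
        | none => d
        | some id => if id = "" then d else d.insert id span) d).keys.length ≤ d.keys.length + l.length) by
    simpa [pvSpanById, PySem.Dict.keys_empty] using h spans PySem.Dict.empty
  intro l
  induction l with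
  | nil => simp
  | cons sp l ihl =>
    intro d
    refine le_trans (ihl _) ?_
    have hstep : ∀ d' : PySem.Dict String (List (String × String)),
        (match pvGet sp "span_id" with
          | none => d'
          | some id => if id = "" then d' else d'.insert id sp).keys.length ≤ d'.keys.length + 1 := by
      intro d'
      cases pvGet sp "span_id" with
      | none => simp
      | some id =>
        by_cases hid : id = ""
        · simp [hid]
        · simp only [if_neg hid]
          by_cases hcon : d'.contains id = true
          · rw [PySem.Dict.keys_insert_of_contains d' sp hcon]; omega
          · rw [PySem.Dict.keys_insert_of_not_contains d' sp (by simpa using hcon)]; simp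
    have := hstep d
    simp only [List.length_cons]
    omega

-- ===== VERDICT (by name: the statement is the Claim_ definition above) =====
theorem compute_span_depths_py_spec : Claim_equal_compute_span_depths_py := by
  intro spans _
  unfold Spec_compute_span_depths_py
  simp only [compute_span_depths_py, compute_span_depths_py_alt]
  have hkeys := pvSpanById_keys_le spans
  have hfun : (fun (cache : PySem.Dict String Int) (span : List (String × String)) =>
      match pvGet span "span_id" with
      | none => cache
      | some id => if id = "" then cache
          else (pvResolve (pvSpanById spans) (spans.length + 1) (some id) [] cache).2)
    = (fun (cache : PySem.Dict String Int) (span : List (String × String)) =>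
      match pvGet span "span_id" with
      | none => cache
      | some id => if id = "" then cache
          else (pvFinish cache (pvWalk (pvSpanById spans) cache (spans.length + 1) (some id) [])).2) := by
    funext cache span
    cases pvGet span "span_id" with
    | none => rfl
    | some id =>
      by_cases hid : id = ""
      · simp [hid]
      · simp only [if_neg hid]
        rw [pvMain (pvSpanById spans) (spans.length + 1) (some id) [] cache
          (by simpa using Nat.lt_succ_of_le hkeys) (by simp) List.nodup_nil]
  simp only [hfun]
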